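-- pv_equiv track=rewrite | github.com/rnks2003/myFoobar | distractTrainers.py | solution
-- ===== SOURCE A (Python) =====
-- def solution(banana_list):
--     def can_thumb_wrestle(a, b):
--         return (a + b) % 2 == 0 and (a - b) % 2 == 0
--
--     matched = [False] * len(banana_list)
--     trainers_left = len(banana_list)
--
--     if len(banana_list)==2 and can_thumb_wrestle(banana_list[0], banana_list[1]):
--         return 2
--
--     for i in range(len(banana_list)):
--         if not matched[i]:
--             for j in range(len(banana_list)):
--                 if not matched[j] and can_thumb_wrestle(banana_list[i], banana_list[j]) and i!=j:
--                     matched[j] = True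
--                     matched[i] = True
--                     trainers_left -= 2
--                     break
--     return trainers_left
-- ===== SOURCE B (Python) =====
-- def solution(banana_list):
--     if len(banana_list) == 2 and (banana_list[0] - banana_list[1]) % 2 == 0:
--         return 2
--     odds = sum(x % 2 for x in banana_list)
--     return (len(banana_list) - odds) % 2 + odds % 2
-- ===== Notes on version B (the rewrite author's own statement) =====
-- stated objective: faster
-- what changed: Replaced the quadratic matched-array greedy pairing (nested scans) by a single pass counting odd elements: since only same-parity numbers pair, the leftover is evens%2 + odds%2; the len==2 special case is kept.
import Mathlib
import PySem

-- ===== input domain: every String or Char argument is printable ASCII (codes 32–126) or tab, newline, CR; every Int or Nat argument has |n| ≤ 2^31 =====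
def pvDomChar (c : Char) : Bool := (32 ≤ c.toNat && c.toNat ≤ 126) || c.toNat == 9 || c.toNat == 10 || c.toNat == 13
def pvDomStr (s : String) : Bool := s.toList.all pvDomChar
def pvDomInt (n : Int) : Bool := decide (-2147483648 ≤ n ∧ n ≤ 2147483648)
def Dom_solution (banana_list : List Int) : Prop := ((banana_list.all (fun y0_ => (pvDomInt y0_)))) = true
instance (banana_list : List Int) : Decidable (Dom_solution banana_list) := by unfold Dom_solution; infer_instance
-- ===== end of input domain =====

-- B replaces A's quadratic matched-array greedy pairing by a one-pass parity count (asymptotically faster); return values agree everywhere.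

-- ===== PORT A =====
def canThumbWrestle (a b : Int) : Bool :=
  PySem.Int.mod (a + b) 2 == 0 && PySem.Int.mod (a - b) 2 == 0

-- one iteration of A's outer loop (inner 'for j … break' = first j satisfying the condition)
def pairStep (xs : List Int) (n : Nat) (st : List Bool × Int) (i : Nat) : List Bool × Int :=
  if st.1.getD i true = false then
    match (List.range n).find? (fun j =>
        st.1.getD j true = false && canThumbWrestle (xs.getD i 0) (xs.getD j 0) && i != j) with
    | some j => ((st.1.set j true).set i true, st.2 - 2)
    | none => st
  else st

def solution (banana_list : List Int) : Int :=
  if banana_list.length == 2 &&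
      canThumbWrestle (banana_list.getD 0 0) (banana_list.getD 1 0) then 2
  else
    ((List.range banana_list.length).foldl (pairStep banana_list banana_list.length)
      (List.replicate banana_list.length false, (banana_list.length : Int))).2

-- ===== PORT B =====
def solution_alt (banana_list : List Int) : Int :=
  if banana_list.length == 2 &&
      PySem.Int.mod (banana_list.getD 0 0 - banana_list.getD 1 0) 2 == 0 then 2
  else
    PySem.Int.mod ((banana_list.length : Int)
        - banana_list.foldl (fun acc x => acc + PySem.Int.mod x 2) 0) 2
      + PySem.Int.mod (banana_list.foldl (fun acc x => acc + PySem.Int.mod x 2) 0) 2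

-- ===== PRECONDITION & SPEC =====
def Spec_solution (banana_list : List Int) (out : Int) : Prop := out = solution_alt banana_list
instance (banana_list : List Int) (out : Int) : Decidable (Spec_solution banana_list out) := by unfold Spec_solution; infer_instance

-- ===== CLAIM (what is proved, stated in full; the proofs are below) =====
def Claim_equal_solution : Prop := ∀ (banana_list : List Int), Dom_solution banana_list → Spec_solution banana_list (solution banana_list)

-- ===== LEMMAS AND PROOFS =====

-- parity of an element, Python's x % 2
def par (x : Int) : Int := PySem.Int.mod x 2

lemma par_emod (x : Int) : par x = x % 2 := PySem.Int.mod_eq_emod_of_pos (by norm_num)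

lemma par_cases (x : Int) : par x = 0 ∨ par x = 1 := by rw [par_emod]; omega

lemma canThumbWrestle_iff (a b : Int) : canThumbWrestle a b = true ↔ par a = par b := by
  simp only [canThumbWrestle, Bool.and_eq_true, beq_iff_eq,
    PySem.Int.mod_eq_emod_of_pos (by norm_num : (0:Int) < 2)]
  rw [par_emod, par_emod]
  omega

-- the set of still-unmatched indices with parity p
def unm (xs : List Int) (m : List Bool) (p : Int) : Finset ℕ :=
  (Finset.range xs.length).filter (fun k => m.getD k true = false ∧ par (xs.getD k 0) = p)

-- all still-unmatched indices
def unmAll (xs : List Int) (m : List Bool) : Finset ℕ :=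
  (Finset.range xs.length).filter (fun k => m.getD k true = false)

lemma getD_set_of_lt (m : List Bool) (j k : Nat) (b : Bool) (hj : j < m.length) :
    (m.set j b).getD k true = (if k = j then b else m.getD k true) := by
  simp only [List.getD, List.getElem?_set]
  split
  · next h => subst h; simp
  · next h => rw [if_neg (fun hh => h hh.symm)]

-- the invariant of A's outer loop
def LoopInv (xs : List Int) (i : Nat) (st : List Bool × Int) : Prop :=
  st.1.length = xs.length ∧
  st.2 = ((unmAll xs st.1).card : Int) ∧
  (∀ p, (unm xs st.1 p).card % 2 = (unm xs (List.replicate xs.length false) p).card % 2) ∧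
  (∀ k < i, st.1.getD k true = false →
    ∀ j < xs.length, j ≠ k → st.1.getD j true = false → par (xs.getD k 0) ≠ par (xs.getD j 0))

lemma unmAll_eq_union (xs : List Int) (m : List Bool) :
    unmAll xs m = unm xs m 0 ∪ unm xs m 1 := by
  ext k
  simp only [unmAll, unm, Finset.mem_union, Finset.mem_filter, Finset.mem_range]
  constructor
  · rintro ⟨hk, hm⟩
    rcases par_cases (xs.getD k 0) with h | h
    · exact Or.inl ⟨hk, hm, h⟩
    · exact Or.inr ⟨hk, hm, h⟩
  · rintro (⟨hk, hm, _⟩ | ⟨hk, hm, _⟩) <;> exact ⟨hk, hm⟩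

lemma unm_disjoint (xs : List Int) (m : List Bool) :
    Disjoint (unm xs m 0) (unm xs m 1) := by
  rw [Finset.disjoint_left]
  intro k h0 h1
  simp only [unm, Finset.mem_filter] at h0 h1
  omega

-- a pairing step: both i and j leave every unmatched set they belong to
lemma unm_set_pair (xs : List Int) (m : List Bool) (i j : Nat)
    (hm : m.length = xs.length) (hi : i < xs.length) (hj : j < xs.length) (p : Int) :
    unm xs ((m.set j true).set i true) p = ((unm xs m p).erase i).erase j := by
  ext k
  simp only [unm, Finset.mem_erase, Finset.mem_filter, Finset.mem_range,
    getD_set_of_lt _ _ _ _ (by simpa [hm] using hi : i < (m.set j true).length),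
    getD_set_of_lt _ _ _ _ (by simpa [hm] using hj : j < m.length)]
  by_cases hki : k = i
  · simp [hki]
  · by_cases hkj : k = j
    · simp [hki, hkj]
    · simp [hki, hkj]

lemma unmAll_set_pair (xs : List Int) (m : List Bool) (i j : Nat)
    (hm : m.length = xs.length) (hi : i < xs.length) (hj : j < xs.length) :
    unmAll xs ((m.set j true).set i true) = ((unmAll xs m).erase i).erase j := by
  ext k
  simp only [unmAll, Finset.mem_erase, Finset.mem_filter, Finset.mem_range,
    getD_set_of_lt _ _ _ _ (by simpa [hm] using hi : i < (m.set j true).length),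
    getD_set_of_lt _ _ _ _ (by simpa [hm] using hj : j < m.length)]
  by_cases hki : k = i
  · simp [hki]
  · by_cases hkj : k = j
    · simp [hki, hkj]
    · simp [hki, hkj]

lemma card_erase_pair {s : Finset ℕ} {i j : ℕ} (hi : i ∈ s) (hj : j ∈ s) (hij : i ≠ j) :
    ((s.erase i).erase j).card + 2 = s.card := by
  have hj' : j ∈ s.erase i := Finset.mem_erase.mpr ⟨fun h => hij h.symm, hj⟩
  rw [Finset.card_erase_of_mem hj', Finset.card_erase_of_mem hi]
  have h1 : 0 < s.card := Finset.card_pos.mpr ⟨i, hi⟩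
  have h2 : 0 < (s.erase i).card := Finset.card_pos.mpr ⟨j, hj'⟩
  rw [Finset.card_erase_of_mem hi] at h2
  omega

lemma pairStep_inv (xs : List Int) (i : Nat) (hi : i < xs.length) (st : List Bool × Int)
    (h : LoopInv xs i st) : LoopInv xs (i + 1) (pairStep xs xs.length st i) := by
  obtain ⟨hlen, hcard, hpar, hnop⟩ := h
  unfold pairStep
  split
  · next hiun =>
    rcases hfind : (List.range xs.length).find? (fun j =>
        st.1.getD j true = false && canThumbWrestle (xs.getD i 0) (xs.getD j 0) && i != j) with _ | j
    · -- no partner found: state unchanged, and i has no unmatched same-parity partner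
      refine ⟨hlen, hcard, hpar, ?_⟩
      intro k hk hkun j hjlt hji hjun
      rcases Nat.lt_or_ge k i with hki | hki
      · exact hnop k hki hkun j hjlt hji hjun
      · obtain rfl : k = i := by omega
        have hfound := List.find?_eq_none.mp hfind j (by simpa using hjlt)
        intro hpp
        have hct : canThumbWrestle (xs.getD k 0) (xs.getD j 0) = true :=
          (canThumbWrestle_iff _ _).mpr hpp
        have hkj : (k != j) = true := by
          simp only [bne_iff_ne, ne_eq]
          exact fun h => hji h.symm
        have hjun' : st.1.getD j true = false := hjun
        apply hfound
        show (decide (st.1.getD j true = false) && canThumbWrestle (xs.getD k 0) (xs.getD j 0)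
          && (k != j)) = true
        rw [decide_eq_true hjun', hct, hkj]
        rfl
    · -- partner j found: i and j both become matched
      have hmem := List.mem_of_find?_eq_some hfind
      have hjlt : j < xs.length := by simpa using hmem
      have hprop := List.find?_some hfind
      simp only [Bool.and_eq_true, bne_iff_ne, ne_eq, decide_eq_true_eq] at hprop
      obtain ⟨⟨hjun, hct⟩, hij⟩ := hprop
      have hpp : par (xs.getD i 0) = par (xs.getD j 0) := (canThumbWrestle_iff _ _).mp hct
      have hiA : i ∈ unmAll xs st.1 :=
        Finset.mem_filter.mpr ⟨Finset.mem_range.mpr hi, hiun⟩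
      have hjA : j ∈ unmAll xs st.1 :=
        Finset.mem_filter.mpr ⟨Finset.mem_range.mpr hjlt, hjun⟩
      have hij' : i ≠ j := fun h => hij (by simp [h])
      show LoopInv xs (i + 1) ((st.1.set j true).set i true, st.2 - 2)
      refine ⟨by simp [hlen], ?_, ?_, ?_⟩
      · -- counter
        rw [unmAll_set_pair xs st.1 i j hlen hi hjlt]
        have hce := card_erase_pair hiA hjA hij'
        omega
      · -- parity counts mod 2
        intro p
        rw [unm_set_pair xs st.1 i j hlen hi hjlt]
        by_cases hp : par (xs.getD i 0) = p
        · have hiP : i ∈ unm xs st.1 p :=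
            Finset.mem_filter.mpr ⟨Finset.mem_range.mpr hi, hiun, hp⟩
          have hjP : j ∈ unm xs st.1 p :=
            Finset.mem_filter.mpr ⟨Finset.mem_range.mpr hjlt, hjun, hpp ▸ hp⟩
          have hce := card_erase_pair hiP hjP hij'
          have hp2 := hpar p
          omega
        · have hiP : i ∉ unm xs st.1 p := by
            simp only [unm, Finset.mem_filter, Finset.mem_range, not_and]
            exact fun _ _ => hp
          have hjP : j ∉ unm xs st.1 p := by
            simp only [unm, Finset.mem_filter, Finset.mem_range, not_and]
            exact fun _ _ => (hpp ▸ hp)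
          rw [Finset.erase_eq_of_notMem (fun h => hjP (Finset.mem_of_mem_erase h)),
            Finset.erase_eq_of_notMem hiP]
          exact hpar p
      · -- no-partner property persists (matched only grows)
        intro k hk hkun j' hj'lt hj'k hj'un
        have hklen : k < st.1.length := by
          rw [hlen]
          rcases Nat.lt_or_ge k i with h' | h'
          · omega
          · have : k = i := by omega
            exact this ▸ hi
        have hkne_i : k ≠ i := by
          intro h; subst h
          rw [getD_set_of_lt _ _ _ _ (by simp [hlen]; exact hi)] at hkun
          simp at hkun
        have hkne_j : k ≠ j := by
          intro h; subst h
          rw [getD_set_of_lt _ _ _ _ (by simp [hlen]; exact hi),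
            getD_set_of_lt _ _ _ _ (hlen ▸ hjlt)] at hkun
          simp [hkne_i] at hkun
        have hkun' : st.1.getD k true = false := by
          rw [getD_set_of_lt _ _ _ _ (by simp [hlen]; exact hi),
            getD_set_of_lt _ _ _ _ (hlen ▸ hjlt), if_neg hkne_i, if_neg hkne_j] at hkun
          exact hkun
        have hj'ne_i : j' ≠ i := by
          intro h; subst h
          rw [getD_set_of_lt _ _ _ _ (by simp [hlen]; exact hi)] at hj'un
          simp at hj'un
        have hj'ne_j : j' ≠ j := by
          intro h; subst h
          rw [getD_set_of_lt _ _ _ _ (by simp [hlen]; exact hi),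
            getD_set_of_lt _ _ _ _ (hlen ▸ hjlt)] at hj'un
          simp [hj'ne_i] at hj'un
        have hj'un' : st.1.getD j' true = false := by
          rw [getD_set_of_lt _ _ _ _ (by simp [hlen]; exact hi),
            getD_set_of_lt _ _ _ _ (hlen ▸ hjlt), if_neg hj'ne_i, if_neg hj'ne_j] at hj'un
          exact hj'un
        have hk_lt_i : k < i := by
          rcases Nat.lt_or_ge k i with h' | h'
          · exact h'
          · exact absurd (by omega : k = i) hkne_i
        exact hnop k hk_lt_i hkun' j' hj'lt hj'k hj'un'
  · -- i already matched
    next hiun =>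
    refine ⟨hlen, hcard, hpar, ?_⟩
    intro k hk hkun j hjlt hji hjun
    rcases Nat.lt_or_ge k i with hki | hki
    · exact hnop k hki hkun j hjlt hji hjun
    · have : k = i := by omega
      subst this
      exact absurd hkun hiun

lemma foldl_inv (xs : List Int) (i : Nat) (hi : i ≤ xs.length) :
    LoopInv xs i ((List.range i).foldl (pairStep xs xs.length)
      (List.replicate xs.length false, (xs.length : Int))) := by
  induction i with
  | zero =>
    have hfull : unmAll xs (List.replicate xs.length false) = Finset.range xs.length := by
      apply Finset.filter_true_of_mem
      intro k hk
      simp only [Finset.mem_range] at hk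
      exact List.getD_replicate false hk
    refine ⟨by simp, ?_, fun p => rfl, fun k hk => (Nat.not_lt_zero k hk).elim⟩
    simp [hfull]
  | succ i ih =>
    rw [List.range_succ, List.foldl_append, List.foldl_cons, List.foldl_nil]
    exact pairStep_inv xs i (by omega) _ (ih (by omega))

-- initial parity count = element count with that parity
lemma card_filter_range_getD (P : Int → Prop) [DecidablePred P] (xs : List Int) :
    ((Finset.range xs.length).filter (fun k => P (xs.getD k 0))).card
      = xs.countP (fun x => decide (P x)) := by
  induction xs using List.reverseRecOn with
  | nil => simp
  | append_singleton xs x ih =>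
    rw [List.length_append, List.length_singleton, Finset.range_add_one, Finset.filter_insert]
    have hsame : ((Finset.range xs.length).filter
        (fun k => P ((xs ++ [x]).getD k 0))).card
        = ((Finset.range xs.length).filter (fun k => P (xs.getD k 0))).card := by
      congr 1
      apply Finset.filter_congr
      intro k hk
      simp only [Finset.mem_range] at hk
      simp [List.getD_eq_getElem?_getD, List.getElem?_append_left hk]
    have hx : (xs ++ [x]).getD xs.length 0 = x := by
      simp [List.getD_eq_getElem?_getD]
    rw [hx]
    split
    · rw [Finset.card_insert_of_notMem (by simp), hsame, ih]
      simp [List.countP_append, *]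
    · rw [hsame, ih]
      simp [List.countP_append, *]

lemma unm_replicate_card (xs : List Int) (p : Int) :
    (unm xs (List.replicate xs.length false) p).card
      = xs.countP (fun x => decide (par x = p)) := by
  rw [← card_filter_range_getD (fun x => par x = p) xs]
  congr 1
  apply Finset.filter_congr
  intro k hk
  simp only [Finset.mem_range] at hk
  simp [List.getD_eq_getElem?_getD, hk]

-- B's one-pass sum counts the odd elements
lemma foldl_par_eq_countP (xs : List Int) (acc : Int) :
    xs.foldl (fun a x => a + PySem.Int.mod x 2) acc
      = acc + (xs.countP (fun x => decide (par x = 1)) : Int) := by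
  induction xs generalizing acc with
  | nil => simp
  | cons x xs ih =>
    rw [List.foldl_cons, ih, List.countP_cons]
    have hx := par_emod x
    rcases par_cases x with h | h <;> rw [par_emod] at h <;>
      simp [par, hx, h]; omega

-- at the end of the loop at most one index of each parity is unmatched
lemma final_card_le_one (xs : List Int) (st : List Bool × Int)
    (h : LoopInv xs xs.length st) (p : Int) : (unm xs st.1 p).card ≤ 1 := by
  obtain ⟨_, _, _, hnop⟩ := h
  apply Finset.card_le_one.mpr
  intro a ha b hb
  by_contra hab
  simp only [unm, Finset.mem_filter, Finset.mem_range] at ha hb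
  exact hnop a ha.1 ha.2.1 b hb.1 (fun h => hab h.symm) hb.2.1
    (ha.2.2.trans hb.2.2.symm)

lemma countP_parity_sum (xs : List Int) :
    xs.countP (fun x => decide (par x = 0)) + xs.countP (fun x => decide (par x = 1))
      = xs.length := by
  induction xs with
  | nil => simp
  | cons x xs ih =>
    rw [List.countP_cons, List.countP_cons, List.length_cons]
    rcases par_cases x with h | h <;> simp [h] <;> omega

-- the general (non-special-case) branch agrees
lemma main_eq (xs : List Int) :
    ((List.range xs.length).foldl (pairStep xs xs.length)
      (List.replicate xs.length false, (xs.length : Int))).2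
    = PySem.Int.mod ((xs.length : Int)
        - xs.foldl (fun acc x => acc + PySem.Int.mod x 2) 0) 2
      + PySem.Int.mod (xs.foldl (fun acc x => acc + PySem.Int.mod x 2) 0) 2 := by
  have hinv := foldl_inv xs xs.length (Nat.le_refl _)
  set st := (List.range xs.length).foldl (pairStep xs xs.length)
    (List.replicate xs.length false, (xs.length : Int)) with hst
  have hcard := hinv.2.1
  have hpar := hinv.2.2.1
  set o := xs.countP (fun x => decide (par x = 1)) with ho
  set e := xs.countP (fun x => decide (par x = 0)) with he
  have hodds : xs.foldl (fun acc x => acc + PySem.Int.mod x 2) 0 = (o : Int) := by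
    rw [foldl_par_eq_countP]; ring
  have hc0 : (unm xs st.1 0).card = e % 2 := by
    have h1 := hpar 0
    rw [unm_replicate_card] at h1
    have h2 := final_card_le_one xs st hinv 0
    omega
  have hc1 : (unm xs st.1 1).card = o % 2 := by
    have h1 := hpar 1
    rw [unm_replicate_card] at h1
    have h2 := final_card_le_one xs st hinv 1
    omega
  have hsum : (unmAll xs st.1).card = e % 2 + o % 2 := by
    rw [unmAll_eq_union, Finset.card_union_of_disjoint (unm_disjoint xs st.1), hc0, hc1]
  have heo : e + o = xs.length := countP_parity_sum xs
  rw [hcard, hsum, hodds,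
    PySem.Int.mod_eq_emod_of_pos (by norm_num : (0:Int) < 2),
    PySem.Int.mod_eq_emod_of_pos (by norm_num : (0:Int) < 2)]
  have : ((xs.length : Int) - o) = (e : Int) := by omega
  rw [this]
  omega

lemma special_cond_eq (xs : List Int) :
    (xs.length == 2 && canThumbWrestle (xs.getD 0 0) (xs.getD 1 0))
    = (xs.length == 2 && (PySem.Int.mod (xs.getD 0 0 - xs.getD 1 0) 2 == 0)) := by
  have h1 : (canThumbWrestle (xs.getD 0 0) (xs.getD 1 0))
      = (PySem.Int.mod (xs.getD 0 0 - xs.getD 1 0) 2 == 0) := by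
    simp only [canThumbWrestle, PySem.Int.mod_eq_emod_of_pos (by norm_num : (0:Int) < 2)]
    set a := xs.getD 0 0
    set b := xs.getD 1 0
    rcases Int.emod_two_eq_zero_or_one (a - b) with h | h <;> simp [h]; omega
  rw [h1]

-- ===== VERDICT (by name: the statement is the Claim_ definition above) =====
theorem solution_spec : Claim_equal_solution := by
  intro xs _
  unfold Spec_solution solution solution_alt
  rw [special_cond_eq]
  split
  · rfl
  · exact main_eq xs
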